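-- pv_equiv track=rewrite | github.com/climate-you/climate | climate/packager/registry.py | _month_blocks
-- ===== SOURCE A (Python) =====
-- def _month_blocks(block_months: int) -> list[list[str]]:
--     block_months = max(1, int(block_months))
--     blocks: list[list[str]] = []
--     m = 1
--     while m <= 12:
--         end_m = min(12, m + block_months - 1)
--         blocks.append([f"{mm:02d}" for mm in range(m, end_m + 1)])
--         m = end_m + 1
--     return blocks
-- ===== SOURCE B (Python) =====
-- def _month_blocks(block_months: int) -> list[list[str]]:
--     block_months = max(1, int(block_months))
--     months = [f"{mm:02d}" for mm in range(1, 13)]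
--     return [months[i:i + block_months] for i in range(0, 12, block_months)]
-- ===== Notes on version B (the rewrite author's own statement) =====
-- stated objective: simpler
-- what changed: B materialises the full month-string list once and partitions it into blocks by stepped index slicing, replacing A's while-loop that recomputes each block's end boundary and builds each block with its own range.
import Mathlib
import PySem

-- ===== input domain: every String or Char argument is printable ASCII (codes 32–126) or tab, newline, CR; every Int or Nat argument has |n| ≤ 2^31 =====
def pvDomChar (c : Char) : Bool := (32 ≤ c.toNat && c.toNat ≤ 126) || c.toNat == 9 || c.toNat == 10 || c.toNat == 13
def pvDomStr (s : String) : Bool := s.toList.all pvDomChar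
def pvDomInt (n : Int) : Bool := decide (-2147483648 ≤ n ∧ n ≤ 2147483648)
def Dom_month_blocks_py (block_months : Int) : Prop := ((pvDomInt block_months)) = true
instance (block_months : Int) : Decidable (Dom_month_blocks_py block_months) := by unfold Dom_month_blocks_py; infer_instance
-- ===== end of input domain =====

-- B replaces A's while-loop (which recomputes each block's end boundary) by building the
-- twelve month strings once and partitioning them by stepped index slicing (objective: simpler).

-- f"{mm:02d}": zero-pad to width 2; exact for 0 ≤ mm (both programs apply it to 1..12 only)
def pvFmt02 (mm : Int) : String :=
  String.ofList (let ds := PySem.Int.toChars mm; if ds.length < 2 then '0' :: ds else ds)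

-- ===== PORT A =====
-- the while-loop; fuel 12 only makes the recursion total (bm ≥ 1 after the clamp, so m
-- strictly increases and at most 12 iterations ever run)
def pvLoopA (fuel : Nat) (bm m : Int) : List (List String) :=
  match fuel with
  | 0 => []
  | f + 1 =>
    if m ≤ 12 then
      ((PySem.List.pyRange m (min 12 (m + bm - 1) + 1) 1).map pvFmt02)
        :: pvLoopA f bm (min 12 (m + bm - 1) + 1)
    else []

def month_blocks_py (block_months : Int) : List (List String) :=
  pvLoopA 12 (max 1 block_months) 1

-- ===== PORT B =====
def month_blocks_py_alt (block_months : Int) : List (List String) :=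
  let bm := max 1 block_months
  let months := (PySem.List.pyRange 1 13 1).map pvFmt02
  (PySem.List.pyRange 0 12 bm).map
    (fun i => PySem.List.slice months (some i) (some (i + bm)))

-- ===== PRECONDITION & SPEC =====
def Spec_month_blocks_py (block_months : Int) (out : List (List String)) : Prop := out = month_blocks_py_alt block_months
instance (block_months : Int) (out : List (List String)) : Decidable (Spec_month_blocks_py block_months out) := by unfold Spec_month_blocks_py; infer_instance

-- ===== CLAIM (what is proved, stated in full; the proofs are below) =====
def Claim_equal_month_blocks_py : Prop := ∀ (block_months : Int), Dom_month_blocks_py block_months → Spec_month_blocks_py block_months (month_blocks_py block_months)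

-- ===== LEMMAS AND PROOFS =====

theorem pv_months_lit :
    (PySem.List.pyRange 1 13 1).map pvFmt02
      = ["01","02","03","04","05","06","07","08","09","10","11","12"] := by decide

theorem pv_range_big {bm : Int} (h : 13 ≤ bm) : PySem.List.pyRange 0 12 bm = [0] := by
  rw [PySem.List.pyRange_of_pos _ _ (by omega)]
  have h0 : (11 : Int) / bm = 0 := Int.ediv_eq_zero_of_lt (by omega) (by omega)
  have h1 : ((12 : Int) - 0 + bm - 1) / bm = 1 := by
    have e : (12 : Int) - 0 + bm - 1 = 11 + 1 * bm := by ring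
    rw [e, Int.add_mul_ediv_right _ _ (by omega : bm ≠ 0), h0]; norm_num
  rw [if_pos (by omega), h1]
  simp

theorem pv_key (bm : Int) (h1 : 1 ≤ bm) :
    pvLoopA 12 bm 1
      = (PySem.List.pyRange 0 12 bm).map
          (fun i => PySem.List.slice ((PySem.List.pyRange 1 13 1).map pvFmt02)
            (some i) (some (i + bm))) := by
  by_cases h : bm ≤ 12
  · interval_cases bm <;> decide
  · rw [pv_range_big (by omega), pv_months_lit]
    have hslice : PySem.List.slice
        (["01","02","03","04","05","06","07","08","09","10","11","12"] : List String)
        (some 0) (some (0 + bm))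
        = ["01","02","03","04","05","06","07","08","09","10","11","12"] := by
      rw [PySem.List.slice_zero_start, PySem.List.slice_to _ (show (0:Int) ≤ 0 + bm by omega)]
      exact List.take_of_length_le (by simp; omega)
    have hmin : min 12 (1 + bm - 1) = 12 := by omega
    simp only [List.map, hslice, pvLoopA, hmin]
    norm_num [pv_months_lit]

theorem month_blocks_py_lemma_spec (block_months : Int) :
    month_blocks_py block_months = month_blocks_py_alt block_months :=
  pv_key (max 1 block_months) (le_max_left 1 block_months)

-- ===== VERDICT (by name: the statement is the Claim_ definition above) =====
theorem month_blocks_py_spec : Claim_equal_month_blocks_py := by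
  intro b _
  exact month_blocks_py_lemma_spec b
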